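-- pv_equiv track=rewrite | github.com/Iunezon/static_website_generator | src/textnode.py | find_first_tag
-- ===== SOURCE A (Python) =====
-- def find_first_tag(string):
--     tags = ["**", "*", "`", "![", "["]
--     min_tag = ""
--     tag_index = len(string)
--     for tag in tags:
--         index = string.find(tag)
--         if 0 <= index < tag_index:
--             min_tag = tag
--             tag_index = index
--     return min_tag, tag_index
-- ===== SOURCE B (Python) =====
-- def find_first_tag(string):
--     tags = ["**", "*", "`", "![", "["]
--     for i in range(len(string)):
--         for tag in tags:
--             if string.startswith(tag, i):
--                 return tag, i
--     return "", len(string)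
-- ===== Notes on version B (the rewrite author's own statement) =====
-- stated objective: alternative
-- what changed: B replaces the five separate string.find() scans followed by a min-selection fold with a single positional left-to-right scan that tests the tags in list order at each index and returns on the first hit.
import Mathlib
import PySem

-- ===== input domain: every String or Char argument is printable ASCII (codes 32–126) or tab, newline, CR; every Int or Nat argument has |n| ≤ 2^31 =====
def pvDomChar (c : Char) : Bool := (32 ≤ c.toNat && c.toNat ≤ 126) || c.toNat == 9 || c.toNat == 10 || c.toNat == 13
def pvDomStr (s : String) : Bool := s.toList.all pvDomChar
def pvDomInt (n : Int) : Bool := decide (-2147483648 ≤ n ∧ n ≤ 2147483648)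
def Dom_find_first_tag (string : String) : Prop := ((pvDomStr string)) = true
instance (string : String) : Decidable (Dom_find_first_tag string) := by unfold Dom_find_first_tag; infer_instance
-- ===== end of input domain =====

-- B replaces five find() scans + min-selection by one positional scan testing the tags in order at each index (objective: alternative).

-- ===== PORT A =====
def find_first_tag (string : String) : String × Int :=
  let tags : List String := ["**", "*", "`", "![", "["]
  tags.foldl
    (fun acc tag =>
      let index := PySem.Str.find string tag
      if 0 ≤ index ∧ index < acc.2 then (tag, index) else acc)
    ("", (PySem.Str.len string : Int))

-- ===== PORT B =====
-- 'string.startswith(tag, i)' with 0 ≤ i ≤ len(string) is exactly 'tag.toList <+: string.toList.drop i',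
-- computed here by PySem.Chars.startswith on the dropped character list; the inner
-- 'for tag in tags: if …: return' is the first tag that matches, i.e. List.find?.
def find_first_tag_alt_go (tags : List String) (string : String) (i : Nat) : String × Int :=
  if h : (i : Int) < PySem.Str.len string then
    match tags.find? (fun tag => PySem.Chars.startswith (string.toList.drop i) tag.toList) with
    | some tag => (tag, (i : Int))
    | none => find_first_tag_alt_go tags string (i + 1)
  else ("", (PySem.Str.len string : Int))
termination_by string.length - i
decreasing_by simp [PySem.Str.len_eq] at h; omega

def find_first_tag_alt (string : String) : String × Int :=
  find_first_tag_alt_go ["**", "*", "`", "![", "["] string 0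

-- ===== PRECONDITION & SPEC =====
def Spec_find_first_tag (string : String) (out : String × Int) : Prop := out = find_first_tag_alt string
instance (string : String) (out : String × Int) : Decidable (Spec_find_first_tag string out) := by unfold Spec_find_first_tag; infer_instance

-- ===== CLAIM (what is proved, stated in full; the proofs are below) =====
def Claim_equal_find_first_tag : Prop := ∀ (string : String), Dom_find_first_tag string → Spec_find_first_tag string (find_first_tag string)

-- ===== LEMMAS AND PROOFS =====

-- A-side fold characterization (generic in the index function g).

theorem foldA_none (g : String → Int) (ts : List String) (mt0 : String) (ti0 : Int)
    (h : ∀ t ∈ ts, ¬ (0 ≤ g t ∧ g t < ti0)) :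
    ts.foldl (fun acc tag => if 0 ≤ g tag ∧ g tag < acc.2 then (tag, g tag) else acc) (mt0, ti0)
      = (mt0, ti0) := by
  induction ts with
  | nil => rfl
  | cons a ts ih =>
      simp only [List.foldl_cons]
      rw [if_neg (h a (by simp))]
      exact ih (fun t ht => h t (by simp [ht]))

theorem foldA_min (g : String → Int) (ts : List String) (k : Int) (tstar : String)
    (hk : 0 ≤ k)
    (hall : ∀ t ∈ ts, g t < 0 ∨ k ≤ g t)
    (hfind : ts.find? (fun t => g t == k) = some tstar) :
    ∀ (mt0 : String) (ti0 : Int), k < ti0 →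
    ts.foldl (fun acc tag => if 0 ≤ g tag ∧ g tag < acc.2 then (tag, g tag) else acc) (mt0, ti0)
      = (tstar, k) := by
  induction ts with
  | nil => simp at hfind
  | cons a ts ih =>
      intro mt0 ti0 hlt
      by_cases hak : g a = k
      · rw [List.find?_cons_of_pos (p := fun t => g t == k) (by simp [hak])] at hfind
        have hta : tstar = a := (Option.some_inj.mp hfind).symm
        subst hta
        simp only [List.foldl_cons]
        rw [if_pos (by constructor <;> omega), hak]
        exact foldA_none g ts tstar k (by
          intro t ht
          rcases hall t (by simp [ht]) with h | h <;> omega)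
      · rw [List.find?_cons_of_neg (p := fun t => g t == k) (by simp [hak])] at hfind
        have hall' : ∀ t ∈ ts, g t < 0 ∨ k ≤ g t := fun t ht => hall t (by simp [ht])
        simp only [List.foldl_cons]
        by_cases hc : 0 ≤ g a ∧ g a < ti0
        · rw [if_pos hc]
          obtain ⟨hc1, hc2⟩ := hc
          have hka : k < g a := by
            rcases hall a (by simp) with h | h
            · omega
            · rcases lt_or_eq_of_le h with h' | h'
              · exact h'
              · exact absurd h'.symm hak
          exact ih hall' hfind a (g a) hka
        · rw [if_neg hc]
          exact ih hall' hfind mt0 ti0 hlt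

-- B-side loop characterization.

theorem bGo_skip (tags : List String) (s : String) :
    ∀ (k j : Nat), j ≤ k → k ≤ s.length →
    (∀ i, j ≤ i → i < k →
        tags.find? (fun tag => PySem.Chars.startswith (s.toList.drop i) tag.toList) = none) →
    find_first_tag_alt_go tags s j = find_first_tag_alt_go tags s k := by
  intro k
  induction k with
  | zero =>
      intro j hj _ _
      have : j = 0 := Nat.le_zero.mp hj
      rw [this]
  | succ k ih =>
      intro j hj hk hnone
      rcases Nat.lt_or_ge j (k + 1) with hlt | hge
      · have h1 : find_first_tag_alt_go tags s j = find_first_tag_alt_go tags s k :=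
          ih j (by omega) (by omega) (fun i hi1 hi2 => hnone i hi1 (by omega))
        have h2 : find_first_tag_alt_go tags s k = find_first_tag_alt_go tags s (k + 1) := by
          rw [find_first_tag_alt_go]
          rw [dif_pos (by simp [PySem.Str.len_eq]; omega)]
          rw [hnone k (by omega) (by omega)]
        rw [h1, h2]
      · have : j = k + 1 := by omega
        rw [this]

theorem bGo_hit (tags : List String) (s : String) (k : Nat) (tstar : String)
    (hk : k < s.length)
    (hfind : tags.find? (fun tag => PySem.Chars.startswith (s.toList.drop k) tag.toList) = some tstar) :
    find_first_tag_alt_go tags s k = (tstar, (k : Int)) := by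
  rw [find_first_tag_alt_go, dif_pos (by simp [PySem.Str.len_eq]; omega), hfind]

theorem bGo_end (tags : List String) (s : String) :
    find_first_tag_alt_go tags s s.length = ("", (PySem.Str.len s : Int)) := by
  rw [find_first_tag_alt_go, dif_neg (by simp [PySem.Str.len_eq])]

-- Matching at a position vs. Chars.find.

theorem match_find_le (l t : List Char) (i : Nat)
    (h : t <+: l.drop i) :
    0 ≤ PySem.Chars.find l t ∧ (PySem.Chars.find l t).toNat ≤ i := by
  have hinf : t <:+: l := h.isInfix.trans (List.drop_suffix i l).isInfix
  have h0 : 0 ≤ PySem.Chars.find l t := (PySem.Chars.find_nonneg_iff l t).mpr hinf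
  refine ⟨h0, ?_⟩
  by_contra hgt
  exact ((PySem.Chars.find_spec h0).2 i (by omega)) h

theorem match_at_find (l t : List Char) (h0 : 0 ≤ PySem.Chars.find l t) :
    t <+: l.drop (PySem.Chars.find l t).toNat :=
  (PySem.Chars.find_spec h0).1

theorem find_lt_length (l t : List Char) (ht : t ≠ []) (h0 : 0 ≤ PySem.Chars.find l t) :
    (PySem.Chars.find l t).toNat < l.length := by
  by_contra hge
  have := match_at_find l t h0
  rw [List.drop_eq_nil_of_le (by omega)] at this
  exact ht (List.prefix_nil.mp this)

theorem find?_congr' {α : Type} (p q : α → Bool) (l : List α) (h : ∀ a ∈ l, p a = q a) :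
    l.find? p = l.find? q := by
  induction l with
  | nil => rfl
  | cons a l ih =>
      by_cases ha : p a = true
      · rw [List.find?_cons_of_pos ha, List.find?_cons_of_pos (by rw [← h a (by simp)]; exact ha)]
      · rw [List.find?_cons_of_neg (by simpa using ha),
            List.find?_cons_of_neg (by rw [← h a (by simp)]; simpa using ha)]
        exact ih (fun x hx => h x (by simp [hx]))

-- existence of a minimal nonnegative index among the tags
theorem exists_min (g : String → Int) (ts : List String)
    (h : ∃ t ∈ ts, 0 ≤ g t) :
    ∃ k : Int, 0 ≤ k ∧ (∃ t ∈ ts, g t = k) ∧ ∀ t ∈ ts, g t < 0 ∨ k ≤ g t := by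
  induction ts with
  | nil => simp at h
  | cons a ts ih =>
      by_cases hts : ∃ t ∈ ts, 0 ≤ g t
      · obtain ⟨k, hk0, ⟨t0, ht0, ht0k⟩, hall⟩ := ih hts
        by_cases ha : 0 ≤ g a ∧ g a < k
        · refine ⟨g a, ha.1, ⟨a, by simp⟩, ?_⟩
          intro t ht
          rcases List.mem_cons.mp ht with rfl | ht
          · right; exact le_refl _
          · rcases hall t ht with h' | h'
            · exact Or.inl h'
            · right; omega
        · refine ⟨k, hk0, ⟨t0, by simp [ht0], ht0k⟩, ?_⟩
          intro t ht
          rcases List.mem_cons.mp ht with rfl | ht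
          · rcases Int.lt_or_le (g t) 0 with h' | h'
            · exact Or.inl h'
            · right; omega
          · exact hall t ht
      · obtain ⟨t0, ht0, h0⟩ := h
        have hta : t0 = a := by
          rcases List.mem_cons.mp ht0 with rfl | ht0'
          · rfl
          · exact absurd ⟨t0, ht0', h0⟩ hts
        subst hta
        refine ⟨g t0, h0, ⟨t0, by simp⟩, ?_⟩
        intro t ht
        rcases List.mem_cons.mp ht with rfl | ht
        · right; exact le_refl _
        · rcases Int.lt_or_le (g t) 0 with h' | h'
          · exact Or.inl h'
          · exact absurd ⟨t, ht, h'⟩ hts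

-- main equivalence

theorem main_eq (s : String) : find_first_tag s = find_first_tag_alt s := by
  have hA : find_first_tag s = (["**", "*", "`", "![", "["] : List String).foldl
      (fun acc tag =>
        if 0 ≤ PySem.Chars.find s.toList tag.toList ∧ PySem.Chars.find s.toList tag.toList < acc.2
        then (tag, PySem.Chars.find s.toList tag.toList) else acc)
      ("", (s.length : Int)) := by
    simp [find_first_tag, PySem.Str.find_eq, PySem.Str.len_eq]
  have hB : find_first_tag_alt s = find_first_tag_alt_go ["**", "*", "`", "![", "["] s 0 := rfl
  set tags : List String := ["**", "*", "`", "![", "["] with htags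
  set g : String → Int := fun t => PySem.Chars.find s.toList t.toList with hg
  have htne : ∀ t ∈ tags, t.toList ≠ [] := by decide
  by_cases hex : ∃ t ∈ tags, 0 ≤ g t
  · obtain ⟨k, hk0, ⟨t0, ht0, ht0k⟩, hall⟩ := exists_min g tags hex
    have hfs : (tags.find? (fun t => g t == k)).isSome := by
      rw [List.find?_isSome]
      exact ⟨t0, ht0, by simp [ht0k]⟩
    obtain ⟨tstar, hfind⟩ := Option.isSome_iff_exists.mp hfs
    have hmem : tstar ∈ tags := List.mem_of_find?_eq_some hfind
    have hgts : g tstar = k := by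
      have := List.find?_some hfind
      simpa using this
    have hgts' : PySem.Chars.find s.toList tstar.toList = k := hgts
    have hlen : k.toNat < s.length := by
      have h1 := find_lt_length s.toList tstar.toList (htne tstar hmem) (by omega)
      rw [String.length_toList] at h1
      omega
    have hAval : find_first_tag s = (tstar, k) := by
      rw [hA]
      exact foldA_min g tags k tstar hk0 hall hfind "" (s.length) (by omega)
    have hnone : ∀ i, 0 ≤ i → i < k.toNat →
        tags.find? (fun tag => PySem.Chars.startswith (s.toList.drop i) tag.toList) = none := by
      intro i _ hik
      rw [List.find?_eq_none]
      intro t ht hp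
      have hpre : t.toList <+: s.toList.drop i := (PySem.Chars.startswith_iff _ _).mp hp
      obtain ⟨h0, hle⟩ := match_find_le s.toList t.toList i hpre
      have hgt : g t = PySem.Chars.find s.toList t.toList := rfl
      rcases hall t ht with h' | h' <;> rw [hgt] at h' <;> omega
    have hfind' : tags.find? (fun tag => PySem.Chars.startswith (s.toList.drop k.toNat) tag.toList)
        = some tstar := by
      have hcong : tags.find? (fun tag => PySem.Chars.startswith (s.toList.drop k.toNat) tag.toList)
          = tags.find? (fun t => g t == k) := by
        apply find?_congr'
        intro t ht
        by_cases hp : PySem.Chars.startswith (s.toList.drop k.toNat) t.toList = true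
        · have hpre := (PySem.Chars.startswith_iff _ _).mp hp
          obtain ⟨h0, hle⟩ := match_find_le s.toList t.toList k.toNat hpre
          have hgt : g t = PySem.Chars.find s.toList t.toList := rfl
          have : g t = k := by
            rcases hall t ht with h' | h' <;> rw [hgt] at h' ⊢ <;> omega
          simp [hp, this]
        · have hne : g t ≠ k := by
            intro hEq
            apply hp
            rw [PySem.Chars.startswith_iff]
            have hgt : PySem.Chars.find s.toList t.toList = k := hEq
            have h0 : 0 ≤ PySem.Chars.find s.toList t.toList := by omega
            have hmm := match_at_find s.toList t.toList h0
            rwa [show (PySem.Chars.find s.toList t.toList).toNat = k.toNat by omega] at hmm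
          simp only [Bool.not_eq_true] at hp
          simp [hp, hne]
      rw [hcong]
      exact hfind
    have hBval : find_first_tag_alt s = (tstar, k) := by
      rw [hB, bGo_skip tags s k.toNat 0 (by omega) (by omega) (fun i h1 h2 => hnone i (by omega) h2),
          bGo_hit tags s k.toNat tstar hlen hfind']
      congr 1
      omega
    rw [hAval, hBval]
  · have hex' : ∀ t ∈ tags, g t < 0 :=
      fun t ht => lt_of_not_ge (fun hc => hex ⟨t, ht, hc⟩)
    have hAval : find_first_tag s = ("", (s.length : Int)) := by
      rw [hA]
      exact foldA_none g tags "" (s.length) (by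
        intro t ht hc
        exact absurd hc.1 (not_le.mpr (hex' t ht)))
    have hnone : ∀ i, 0 ≤ i → i < s.length →
        tags.find? (fun tag => PySem.Chars.startswith (s.toList.drop i) tag.toList) = none := by
      intro i _ _
      rw [List.find?_eq_none]
      intro t ht hp
      have hpre := (PySem.Chars.startswith_iff _ _).mp hp
      obtain ⟨h0, _⟩ := match_find_le s.toList t.toList i hpre
      exact absurd (show (0:Int) ≤ g t from h0) (not_le.mpr (hex' t ht))
    have hBval : find_first_tag_alt s = ("", (s.length : Int)) := by
      rw [hB, bGo_skip tags s s.length 0 (by omega) (le_refl _)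
            (fun i h1 h2 => hnone i (by omega) h2),
          bGo_end tags s]
      simp [PySem.Str.len_eq]
    rw [hAval, hBval]

-- ===== VERDICT (by name: the statement is the Claim_ definition above) =====
theorem find_first_tag_spec : Claim_equal_find_first_tag := by
  intro s _
  show find_first_tag s = find_first_tag_alt s
  exact main_eq s
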